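-- pv_equiv track=rewrite | github.com/CLEVER1337/acmp_agent | solutions/852.py | is_valid_xml
-- ===== SOURCE A (Python) =====
-- def is_valid_xml(s):
--     stack = []
--     i = 0
--     n = len(s)
--     while i < n:
--         if s[i] == '<':
--             j = i + 1
--             if j >= n:
--                 return False
--             if s[j] == '/':
--                 j += 1
--                 if j >= n:
--                     return False
--                 start = j
--                 while j < n and s[j] != '>':
--                     if not s[j].isalpha():
--                         return False
--                     j += 1
--                 if j >= n:
--                     return False
--                 tag = s[start:j]
--                 if not stack or stack[-1] != tag:
--                     return False
--                 stack.pop()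
--                 i = j + 1
--             else:
--                 start = j
--                 while j < n and s[j] != '>':
--                     if not s[j].isalpha():
--                         return False
--                     j += 1
--                 if j >= n:
--                     return False
--                 tag = s[start:j]
--                 if not tag:
--                     return False
--                 stack.append(tag)
--                 i = j + 1
--         else:
--             return False
--     return len(stack) == 0
-- ===== SOURCE B (Python) =====
-- def _tokenize(s):
--     """Phase 1: split s into a list of (is_close, name) tokens, or None if malformed."""
--     tokens = []
--     i, n = 0, len(s)
--     while i < n:
--         if s[i] != '<':
--             return None
--         i += 1
--         is_close = i < n and s[i] == '/'
--         if is_close: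
--             i += 1
--         name = []
--         while i < n and s[i] != '>':
--             if not s[i].isalpha():
--                 return None
--             name.append(s[i])
--             i += 1
--         if i >= n:
--             return None
--         if not is_close and not name:
--             return None
--         tokens.append((is_close, ''.join(name)))
--         i += 1
--     return tokens
--
-- def is_valid_xml(s):
--     tokens = _tokenize(s)
--     if tokens is None:
--         return False
--     stack = []
--     for is_close, name in tokens:
--         if is_close:
--             if not stack or stack[-1] != name:
--                 return False
--             stack.pop()
--         else:
--             stack.append(name)
--     return not stack
-- ===== Notes on version B (the rewrite author's own statement) =====
-- stated objective: alternative
-- what changed: B splits A's single index-driven while-loop into two passes: a tokenizer that turns the string into a list of (is_close, name) tokens (or rejects it), followed by a separate stack pass over the token list.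
import Mathlib
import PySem

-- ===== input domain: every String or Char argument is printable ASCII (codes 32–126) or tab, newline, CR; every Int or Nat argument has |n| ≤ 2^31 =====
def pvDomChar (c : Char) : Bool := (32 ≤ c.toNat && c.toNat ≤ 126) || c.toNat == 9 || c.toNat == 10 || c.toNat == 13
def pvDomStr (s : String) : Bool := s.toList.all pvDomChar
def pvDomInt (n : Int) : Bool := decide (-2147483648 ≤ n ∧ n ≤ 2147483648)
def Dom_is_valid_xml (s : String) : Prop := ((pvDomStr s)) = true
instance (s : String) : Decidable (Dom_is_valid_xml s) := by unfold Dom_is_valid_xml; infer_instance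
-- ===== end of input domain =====

-- B re-decomposes A's single index-driven scan into two passes (tokenize, then stack-check); return values proved equal on all inputs.

-- ===== PORT A =====
-- A's inner 'while j < n and s[j] != '>'' name scan: returns (tag, rest after '>'); none = the loop
-- ran off the end of the string (A's 'if j >= n: return False') or hit a non-alpha char (A's 'return False').
def pvScanA : List Char → Option (List Char × List Char)
  | [] => none
  | c :: r =>
    if c = '>' then some ([], r)
    else if PySem.Chars.isalpha c then (pvScanA r).map (fun p => (c :: p.1, p.2))
    else none

theorem pvScanA_length : ∀ (cs t r : List Char), pvScanA cs = some (t, r) → r.length < cs.length := by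
  intro cs
  induction cs with
  | nil => intro t r h; simp [pvScanA] at h
  | cons c cr ih =>
    intro t r h
    rw [pvScanA] at h
    split_ifs at h with h1 h2
    · simp only [Option.some.injEq, Prod.mk.injEq] at h
      obtain ⟨-, h2'⟩ := h
      subst h2'; simp
    · cases hs : pvScanA cr with
      | none => rw [hs] at h; simp at h
      | some p =>
        rw [hs] at h
        simp only [Option.map_some, Option.some.injEq, Prod.mk.injEq] at h
        obtain ⟨-, h2'⟩ := h
        subst h2'
        have := ih p.1 p.2 (by rw [hs])
        simp only [List.length_cons]; omega

-- A's outer while loop over i, carried state = the stack (top = head).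
def pvAuxA : List Char → List (List Char) → Bool
  | [], stack => stack.isEmpty
  | c :: rest, stack =>
    if c = '<' then
      match rest with
      | [] => false
      | d :: rest2 =>
        if d = '/' then
          match hA : pvScanA rest2 with
          | none => false
          | some (tag, rest') =>
            match stack with
            | [] => false
            | t :: st => if t = tag then pvAuxA rest' st else false
        else
          match hA : pvScanA (d :: rest2) with
          | none => false
          | some (tag, rest') =>
            if tag = [] then false else pvAuxA rest' (tag :: stack)
    else false
  termination_by cs _ => cs.length
  decreasing_by
  · have := pvScanA_length _ _ _ hA; simp; omega
  · have := pvScanA_length _ _ _ hA; simp at this ⊢; omega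

def is_valid_xml (s : String) : Bool := pvAuxA s.toList []

-- ===== PORT B =====
-- B's name reader (the inner while of _tokenize): alpha chars until '>', none on truncation/non-alpha.
def pvReadName : List Char → Option (List Char × List Char)
  | [] => none
  | c :: r =>
    if c = '>' then some ([], r)
    else if PySem.Chars.isalpha c then (pvReadName r).map (fun p => (c :: p.1, p.2))
    else none

theorem pvReadName_eq_pvScanA : ∀ cs, pvReadName cs = pvScanA cs := by
  intro cs
  induction cs with
  | nil => rfl
  | cons c r ih => simp only [pvReadName, pvScanA, ih]

-- B's phase 1 (_tokenize): the whole string to a token list (is_close, name), or none if malformed.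
def pvTokenize : List Char → Option (List (Bool × List Char))
  | [] => some []
  | c :: rest =>
    if c = '<' then
      match rest with
      | '/' :: rest2 =>
        -- is_close: skip the '/', read the name (close tags need no non-empty name check)
        match hB : pvReadName rest2 with
        | none => none
        | some (name, rest3) =>
          match pvTokenize rest3 with
          | none => none
          | some ts => some ((true, name) :: ts)
      | r =>
        match hB : pvReadName r with
        | none => none
        | some (name, rest3) =>
          if name = [] then none
          else
            match pvTokenize rest3 with
            | none => none
            | some ts => some ((false, name) :: ts)
    else none
  termination_by cs => cs.length
  decreasing_by
  · have hl : rest3.length < rest2.length := by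
      rw [pvReadName_eq_pvScanA] at hB
      exact pvScanA_length _ _ _ hB
    simp only [List.length_cons]; omega
  · have hl : rest3.length < r.length := by
      rw [pvReadName_eq_pvScanA] at hB
      exact pvScanA_length _ _ _ hB
    simp only [List.length_cons]; omega

-- B's phase 2: the stack pass over the token list.
def pvCheck : List (Bool × List Char) → List (List Char) → Bool
  | [], stack => stack.isEmpty
  | (true, name) :: ts, stack =>
    match stack with
    | [] => false
    | t :: st => if t = name then pvCheck ts st else false
  | (false, name) :: ts, stack => pvCheck ts (name :: stack)

def is_valid_xml_alt (s : String) : Bool :=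
  match pvTokenize s.toList with
  | none => false
  | some ts => pvCheck ts []

-- ===== PRECONDITION & SPEC =====
def Spec_is_valid_xml (s : String) (out : Bool) : Prop := out = is_valid_xml_alt s
instance (s : String) (out : Bool) : Decidable (Spec_is_valid_xml s out) := by unfold Spec_is_valid_xml; infer_instance

-- ===== CLAIM (what is proved, stated in full; the proofs are below) =====
def Claim_equal_is_valid_xml : Prop := ∀ (s : String), Dom_is_valid_xml s → Spec_is_valid_xml s (is_valid_xml s)

-- ===== LEMMAS AND PROOFS =====

theorem pvMain : ∀ (n : Nat) (cs : List Char) (stack : List (List Char)), cs.length ≤ n →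
    pvAuxA cs stack =
      (match pvTokenize cs with
       | none => false
       | some ts => pvCheck ts stack) := by
  intro n
  induction n with
  | zero =>
    intro cs stack hlen
    have : cs = [] := by cases cs <;> simp_all
    subst this
    simp [pvAuxA, pvTokenize, pvCheck]
  | succ n ih =>
    intro cs stack hlen
    cases cs with
    | nil => simp [pvAuxA, pvTokenize, pvCheck]
    | cons c rest =>
      by_cases hc : c = '<'
      · subst hc
        cases rest with
        | nil =>
          rw [pvAuxA, pvTokenize]
          simp [pvReadName]
          simp
        | cons d rest2 =>
          by_cases hd : d = '/'
          · subst hd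
            have hre := pvReadName_eq_pvScanA rest2
            rw [pvAuxA, pvTokenize]
            simp only [ite_true]
            split
            · rename_i hA
              rw [hre, hA]
            · rename_i tag rest' hA
              have hlt := pvScanA_length _ _ _ hA
              have hB : pvReadName rest2 = some (tag, rest') := by rw [hre, hA]
              rw [hB]
              have hih := fun st => ih rest' st (by simp at hlen; omega)
              cases ht : pvTokenize rest' with
              | none =>
                cases stack with
                | nil => simp [ht]
                | cons t st =>
                  by_cases htt : t = tag <;> simp [htt, hih st, ht, pvCheck]
              | some ts =>
                cases stack with
                | nil => simp [ht, pvCheck]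
                | cons t st =>
                  by_cases htt : t = tag <;> simp [htt, hih st, ht, pvCheck]
          · have hre := pvReadName_eq_pvScanA (d :: rest2)
            rw [pvAuxA, pvTokenize]
            simp only [ite_true, if_neg hd]
            split
            · rename_i hA
              have hB : pvReadName (d :: rest2) = none := hre.trans hA
              rw [hB]
            · rename_i tag rest' hA
              have hlt := pvScanA_length _ _ _ hA
              have hB : pvReadName (d :: rest2) = some (tag, rest') := hre.trans hA
              rw [hB]
              have hih := fun st => ih rest' st (by simp at hlen hlt; omega)
              by_cases htag : tag = []
              · simp [htag]
              · simp only [htag, ite_false, if_neg, not_false_iff]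
                cases ht : pvTokenize rest' with
                | none => simp [htag, ht, hih (tag :: stack)]
                | some ts => simp [htag, ht, hih (tag :: stack), pvCheck]
            · intro r h
              injection h with h1 _
              exact hd h1
      · rw [pvAuxA.eq_def, pvTokenize.eq_def]
        simp [hc]

-- ===== VERDICT (by name: the statement is the Claim_ definition above) =====
theorem is_valid_xml_spec : Claim_equal_is_valid_xml := by
  intro s _
  unfold Spec_is_valid_xml is_valid_xml is_valid_xml_alt
  exact pvMain s.toList.length s.toList [] le_rfl
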